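-- pv_equiv track=rewrite | github.com/tringuyen180303/TIP102-CodePath | unit3/session2/build_skyscraper.py | build_skyscrapers
-- ===== SOURCE A (Python) =====
-- def build_skyscrapers(floors):
--     skyscaper = 1
--     for i in range(len(floors)):
--         for j in range(i+1, len(floors)):
--             if floors[j] > floors[i]:
--                 break
--             elif floors[j] < floors[i]:
--                 skyscaper += 1
--                 break
--     return skyscaper
-- ===== SOURCE B (Python) =====
-- def build_skyscrapers(floors):
--     count = 1
--     nd = None       # next distinct value to the right of the current position
--     prev = None     # value immediately to the right
--     for v in reversed(floors):
--         if prev is not None: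
--             if prev != v:
--                 nd = prev
--             if nd is not None and nd < v:
--                 count += 1
--         prev = v
--     return count
-- ===== Notes on version B (the rewrite author's own statement) =====
-- stated objective: faster
-- what changed: Replaced A's nested loops (for each position, scan forward to the first distinct value) with a single right-to-left pass that maintains the next distinct value, counting positions whose next distinct value is smaller.
import Mathlib
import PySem

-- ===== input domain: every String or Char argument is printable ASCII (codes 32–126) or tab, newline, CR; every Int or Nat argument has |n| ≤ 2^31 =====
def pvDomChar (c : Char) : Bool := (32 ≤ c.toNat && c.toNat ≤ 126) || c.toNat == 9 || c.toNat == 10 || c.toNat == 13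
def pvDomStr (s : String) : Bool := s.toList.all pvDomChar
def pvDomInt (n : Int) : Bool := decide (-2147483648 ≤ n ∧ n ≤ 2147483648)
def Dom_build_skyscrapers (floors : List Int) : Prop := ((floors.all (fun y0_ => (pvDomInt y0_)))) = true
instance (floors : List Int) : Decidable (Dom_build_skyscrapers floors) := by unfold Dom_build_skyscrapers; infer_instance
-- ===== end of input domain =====

-- B replaces A's quadratic forward scan (for each position, scan ahead for the first
-- distinct value) by a single right-to-left pass maintaining the next distinct value.

-- ===== PORT A =====
-- inner loop "for j in range(i+1, len(floors))" over the suffix after position i: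
-- break (0) on a larger value, count-and-break (1) on a smaller one, continue on equal.
def pvInnerA (a : Int) : List Int → Int
  | [] => 0
  | b :: t => if b > a then 0 else if b < a then 1 else pvInnerA a t

-- outer loop "for i in range(len(floors))": position i is the head of each suffix.
def pvOuterA : List Int → Int → Int
  | [], acc => acc
  | a :: t, acc => pvOuterA t (acc + pvInnerA a t)

def build_skyscrapers (floors : List Int) : Int := pvOuterA floors 1

-- ===== PORT B =====
-- "for v in reversed(floors)" with state (count, nd, prev)
def pvStepB (st : Int × Option Int × Option Int) (v : Int) : Int × Option Int × Option Int :=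
  match st with
  | (count, nd, prev) =>
    match prev with
    | none => (count, nd, some v)
    | some p =>
      let nd' := if p ≠ v then some p else nd
      let count' := match nd' with
        | some x => if x < v then count + 1 else count
        | none => count
      (count', nd', some v)

def build_skyscrapers_alt (floors : List Int) : Int :=
  (floors.reverse.foldl pvStepB (1, none, none)).1

-- ===== PRECONDITION & SPEC =====
def Spec_build_skyscrapers (floors : List Int) (out : Int) : Prop := out = build_skyscrapers_alt floors
instance (floors : List Int) (out : Int) : Decidable (Spec_build_skyscrapers floors out) := by unfold Spec_build_skyscrapers; infer_instance

-- ===== CLAIM (what is proved, stated in full; the proofs are below) =====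
def Claim_equal_build_skyscrapers : Prop := ∀ (floors : List Int), Dom_build_skyscrapers floors → Spec_build_skyscrapers floors (build_skyscrapers floors)

-- ===== LEMMAS AND PROOFS =====

-- sum of pvInnerA over all suffixes (A's count without the initial 1)
def pvCnt : List Int → Int
  | [] => 0
  | a :: t => pvInnerA a t + pvCnt t

theorem pvOuterA_eq (l : List Int) : ∀ acc : Int, pvOuterA l acc = acc + pvCnt l := by
  induction l with
  | nil => intro acc; simp [pvOuterA, pvCnt]
  | cons a t ih => intro acc; simp [pvOuterA, pvCnt, ih]; ring

-- the first value in the tail distinct from the head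
def pvNd : List Int → Option Int
  | [] => none
  | [_] => none
  | a :: b :: t => if b ≠ a then some b else pvNd (b :: t)

theorem pvInnerA_eq_nd (a : Int) (t : List Int) :
    pvInnerA a t = (match pvNd (a :: t) with
      | some x => if x < a then 1 else 0
      | none => (0 : Int)) := by
  induction t with
  | nil => simp [pvInnerA, pvNd]
  | cons b t' ih =>
    by_cases h : b = a
    · subst h
      simpa [pvInnerA, pvNd] using ih
    · simp only [pvInnerA, pvNd, h, ne_eq, not_false_iff, if_true]
      rcases lt_trichotomy b a with hlt | heq | hgt
      · simp [not_lt.mpr (le_of_lt hlt), hlt]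
      · exact absurd heq h
      · simp [hgt, not_lt.mpr (le_of_lt hgt)]

-- foldl over the reverse, peeled one element at the front of the original list
theorem pvFoldRev_cons (v : Int) (t : List Int) :
    (v :: t).reverse.foldl pvStepB (1, none, none)
      = pvStepB (t.reverse.foldl pvStepB (1, none, none)) v := by
  simp [List.reverse_cons, List.foldl_append]

-- the invariant of B's pass: count so far, next distinct of the head, the head itself
theorem pvB_invariant (l : List Int) :
    l.reverse.foldl pvStepB (1, none, none) = (1 + pvCnt l, pvNd l, l.head?) := by
  induction l with
  | nil => simp [pvCnt, pvNd]
  | cons v t ih =>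
    rw [pvFoldRev_cons, ih]
    cases t with
    | nil => simp [pvStepB, pvCnt, pvNd, pvInnerA]
    | cons b t' =>
      show pvStepB (1 + pvCnt (b :: t'), pvNd (b :: t'), some b) v = _
      have hnd : (if b ≠ v then some b else pvNd (b :: t')) = pvNd (v :: b :: t') := by
        simp [pvNd]
      simp only [pvStepB, hnd]
      have hc : pvCnt (v :: b :: t') = pvInnerA v (b :: t') + pvCnt (b :: t') := rfl
      rw [pvInnerA_eq_nd] at hc
      cases hx : pvNd (v :: b :: t') with
      | none => simp [hx, hc, List.head?]
      | some x =>
        by_cases hxv : x < v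
        · simp [hx, hxv, hc, List.head?]; ring
        · simp [hx, hxv, hc, List.head?]

-- ===== VERDICT (by name: the statement is the Claim_ definition above) =====
theorem build_skyscrapers_spec : Claim_equal_build_skyscrapers := by
  intro floors _
  show build_skyscrapers floors = build_skyscrapers_alt floors
  rw [build_skyscrapers, build_skyscrapers_alt, pvB_invariant, pvOuterA_eq]
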